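-- pv_equiv track=rewrite | github.com/yannickloth/W33-Theory | tools/h27_triplet_structure.py | row_reduce_mod3
-- ===== SOURCE A (Python) =====
-- def row_reduce_mod3(mat):
--     m = [list(row) for row in mat]
--     n_rows = len(m)
--     n_cols = len(m[0]) if n_rows else 0
--     rank = 0
--     col = 0
--     pivots = []
--     while rank < n_rows and col < n_cols:
--         pivot = None
--         for r in range(rank, n_rows):
--             if m[r][col] % 3 != 0:
--                 pivot = r
--                 break
--         if pivot is None:
--             col += 1
--             continue
--         m[rank], m[pivot] = m[pivot], m[rank]
--         inv = 1 if m[rank][col] == 1 else 2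
--         m[rank] = [(inv * x) % 3 for x in m[rank]]
--         for r in range(n_rows):
--             if r == rank:
--                 continue
--             factor = m[r][col] % 3
--             if factor != 0:
--                 m[r] = [(m[r][c] - factor * m[rank][c]) % 3 for c in range(n_cols)]
--         pivots.append(col)
--         rank += 1
--         col += 1
--     return rank, m, pivots
-- ===== SOURCE B (Python) =====
-- def _eliminate(row, factor, prow, n_cols):
--     return [(row[c] - factor * prow[c]) % 3 for c in range(n_cols)]
--
--
-- def _find_pivot(m, rank, n_rows, col):
--     return next((r for r in range(rank, n_rows) if m[r][col] % 3 != 0), None)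
--
--
-- def _forward_step(m, rank, pivots, col, n_rows, n_cols):
--     # one column of the forward phase: pivot, normalize, eliminate BELOW only
--     if rank >= n_rows:
--         return rank
--     piv = _find_pivot(m, rank, n_rows, col)
--     if piv is None:
--         return rank
--     m[rank], m[piv] = m[piv], m[rank]
--     inv = 1 if m[rank][col] == 1 else 2
--     m[rank] = [(inv * x) % 3 for x in m[rank]]
--     for r in range(rank + 1, n_rows):
--         factor = m[r][col] % 3
--         if factor != 0:
--             m[r] = _eliminate(m[r], factor, m[rank], n_cols)
--     pivots.append(col)
--     return rank + 1
--
--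
-- def _sweep_row(m, pivots, rank, n_cols, i, row):
--     # sweep one pivot row against the frozen forward-phase matrix m
--     for k in range(i + 1, rank):
--         factor = row[pivots[k]] % 3
--         if factor != 0:
--             row = _eliminate(row, factor, m[k], n_cols)
--     return row
--
--
-- def row_reduce_mod3(mat):
--     # Two-phase variant: forward elimination, then an independent sweep of each
--     # pivot row against the frozen forward matrix (A's step-k pivot-row states).
--     m = [list(row) for row in mat]
--     n_rows = len(m)
--     n_cols = len(m[0]) if n_rows else 0
--     rank = 0
--     pivots = []
--     for col in range(n_cols):
--         rank = _forward_step(m, rank, pivots, col, n_rows, n_cols)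
--     out = [row[:] for row in m]
--     for i in range(rank):
--         out[i] = _sweep_row(m, pivots, rank, n_cols, i, out[i])
--     return rank, out, pivots
-- ===== Notes on version B (the rewrite author's own statement) =====
-- stated objective: alternative
-- what changed: Gauss-Jordan (each pivot step eliminates every other row in place) is replaced by forward-only elimination followed by an independent per-row sweep of each pivot row against the frozen forward-phase matrix; since A uses pivot row k's step-k state, which equals the forward-phase row k, the results coincide exactly.
-- outside the precondition, e.g. on row_reduce_mod3([[0, 0], [1]]): A returns (1, [[1], [0, 0]], [0]), B returns (1, [[1], [0, 0]], [0])
import Mathlib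
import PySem

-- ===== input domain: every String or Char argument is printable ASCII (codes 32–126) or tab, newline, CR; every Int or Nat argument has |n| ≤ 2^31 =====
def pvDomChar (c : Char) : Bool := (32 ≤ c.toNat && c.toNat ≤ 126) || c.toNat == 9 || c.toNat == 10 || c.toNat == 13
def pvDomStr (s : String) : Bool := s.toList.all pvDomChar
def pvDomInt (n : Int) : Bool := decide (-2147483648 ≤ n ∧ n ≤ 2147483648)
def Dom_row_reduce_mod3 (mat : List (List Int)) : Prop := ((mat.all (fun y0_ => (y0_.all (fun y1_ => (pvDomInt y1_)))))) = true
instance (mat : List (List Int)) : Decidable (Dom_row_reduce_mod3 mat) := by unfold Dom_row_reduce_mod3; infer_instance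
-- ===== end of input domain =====

-- B replaces A's Gauss-Jordan (each pivot eliminates every other row in place) by forward
-- elimination followed by an independent per-row sweep against the frozen forward matrix.

-- ===== PORT A =====
-- shared textual pieces of both Pythons (the same comprehensions appear verbatim in Source A and Source B)
def pvMod3 (x : Int) : Int := PySem.Int.mod x 3

def pvEntry (m : List (List Int)) (r c : Nat) : Int := (m.getD r []).getD c 0

-- [(inv * x) % 3 for x in row]
def pvNorm (inv : Int) (row : List Int) : List Int := row.map (fun x => pvMod3 (inv * x))

-- [(row[c] - factor * prow[c]) % 3 for c in range(n_cols)]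
def pvElimRow (row : List Int) (factor : Int) (prow : List Int) (ncols : Nat) : List Int :=
  (List.range ncols).map (fun c => pvMod3 (row.getD c 0 - factor * prow.getD c 0))

-- m[rank], m[pivot] = m[pivot], m[rank]
def pvSwap (m : List (List Int)) (i j : Nat) : List (List Int) :=
  (m.set i (m.getD j [])).set j (m.getD i [])

-- 'for r in range(rank, n_rows): if m[r][col] % 3 != 0: pivot = r; break'
def pvFindPivot (m : List (List Int)) (rank nrows col : Nat) : Option Nat :=
  (List.range' rank (nrows - rank)).find? (fun r => pvMod3 (pvEntry m r col) != 0)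

-- A's while loop; state (m, rank, col, pivots), terminates because col increases each turn
def pvLoopA (nrows ncols : Nat) (m : List (List Int)) (rank col : Nat) (pivots : List Nat) :
    Nat × List (List Int) × List Nat :=
  if _h : rank < nrows ∧ col < ncols then
    match pvFindPivot m rank nrows col with
    | none => pvLoopA nrows ncols m rank (col + 1) pivots
    | some p =>
      let m1 := pvSwap m rank p
      let inv : Int := if pvEntry m1 rank col = 1 then 1 else 2
      let m2 := m1.set rank (pvNorm inv (m1.getD rank []))
      -- 'for r in range(n_rows): if r == rank: continue; …'
      let m3 := (List.range nrows).foldl (fun acc r =>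
          if r = rank then acc
          else if pvMod3 (pvEntry acc r col) ≠ 0 then
            acc.set r (pvElimRow (acc.getD r []) (pvMod3 (pvEntry acc r col)) (acc.getD rank []) ncols)
          else acc) m2
      pvLoopA nrows ncols m3 (rank + 1) (col + 1) (pivots ++ [col])
  else (rank, m, pivots)
  termination_by ncols - col
  decreasing_by all_goals omega

def row_reduce_mod3 (mat : List (List Int)) : Int × List (List Int) × List Int :=
  let nrows := mat.length
  let ncols := if nrows ≠ 0 then (mat.headD []).length else 0
  let res := pvLoopA nrows ncols mat 0 0 []
  ((res.1 : Int), res.2.1, res.2.2.map (fun c => (c : Int)))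

-- ===== PORT B =====
-- one iteration of B's 'for col in range(n_cols)' phase-1 loop
-- ('break' once rank == n_rows: rank never decreases, so the remaining turns do nothing)
def pvStepB (nrows ncols : Nat) (s : List (List Int) × Nat × List Nat) (col : Nat) :
    List (List Int) × Nat × List Nat :=
  let m := s.1; let rank := s.2.1; let pivots := s.2.2
  if nrows ≤ rank then s
  else match pvFindPivot m rank nrows col with
  | none => s
  | some p =>
    let m1 := pvSwap m rank p
    let inv : Int := if pvEntry m1 rank col = 1 then 1 else 2
    let m2 := m1.set rank (pvNorm inv (m1.getD rank []))
    -- 'for r in range(rank + 1, n_rows): …'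
    let m3 := (List.range' (rank + 1) (nrows - (rank + 1))).foldl (fun acc r =>
        if pvMod3 (pvEntry acc r col) ≠ 0 then
          acc.set r (pvElimRow (acc.getD r []) (pvMod3 (pvEntry acc r col)) (acc.getD rank []) ncols)
        else acc) m2
    (m3, rank + 1, pivots ++ [col])

-- 'row = out[i]; for k in range(i + 1, rank): …' — sweep one row against the frozen matrix R
def pvSweepRow (R : List (List Int)) (pivots : List Nat) (rank ncols i : Nat) (row : List Int) :
    List Int :=
  (List.range' (i + 1) (rank - (i + 1))).foldl (fun row k =>
    if pvMod3 (row.getD (pivots.getD k 0) 0) ≠ 0 then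
      pvElimRow row (pvMod3 (row.getD (pivots.getD k 0) 0)) (R.getD k []) ncols
    else row) row

def row_reduce_mod3_alt (mat : List (List Int)) : Int × List (List Int) × List Int :=
  let nrows := mat.length
  let ncols := if nrows ≠ 0 then (mat.headD []).length else 0
  let s := (List.range ncols).foldl (pvStepB nrows ncols) (mat, 0, [])
  let m := s.1; let rank := s.2.1; let pivots := s.2.2
  -- 'out = [row[:] for row in m]; for i in range(rank): out[i] = swept row'
  let out := (List.range rank).foldl (fun out i =>
      out.set i (pvSweepRow m pivots rank ncols i (out.getD i []))) m
  ((rank : Int), out, pivots.map (fun c => (c : Int)))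

-- ===== PRECONDITION & SPEC =====
-- Pre_ excludes ragged inputs having a row shorter than the first row: there A usually raises
-- IndexError, and on the few such inputs where A still returns, which entries were ever read
-- is an accident of the loop's path (B returns the same value on the cited example).
def Pre_row_reduce_mod3 (mat : List (List Int)) : Prop :=
  ∀ row ∈ mat, (mat.headD []).length ≤ row.length
instance (mat : List (List Int)) : Decidable (Pre_row_reduce_mod3 mat) := by
  unfold Pre_row_reduce_mod3; infer_instance

def pvWitness_row_reduce_mod3 : List (List Int) := [[1, 2], [0, 1]]

def Spec_row_reduce_mod3 (mat : List (List Int)) (out : Int × List (List Int) × List Int) : Prop := out = row_reduce_mod3_alt mat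
instance (mat : List (List Int)) (out : Int × List (List Int) × List Int) : Decidable (Spec_row_reduce_mod3 mat out) := by unfold Spec_row_reduce_mod3; infer_instance

-- ===== CLAIM (what is proved, stated in full; the proofs are below) =====
def Claim_equal_row_reduce_mod3 : Prop := ∀ (mat : List (List Int)), Dom_row_reduce_mod3 mat → Pre_row_reduce_mod3 mat → Spec_row_reduce_mod3 mat (row_reduce_mod3 mat)

-- ===== LEMMAS AND PROOFS =====

-- getD/set bookkeeping
theorem pvGetD_set_ne {α : Type} (l : List α) (i j : Nat) (a d : α) (h : i ≠ j) :
    (l.set i a).getD j d = l.getD j d := by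
  simp [List.getD_eq_getElem?_getD, List.getElem?_set_ne h]

theorem pvGetD_set_self {α : Type} (l : List α) (i : Nat) (a d : α) (h : i < l.length) :
    (l.set i a).getD i d = a := by
  simp [List.getD_eq_getElem?_getD, h]

theorem pvSet_getD_self {α : Type} (l : List α) (i : Nat) (d : α) :
    l.set i (l.getD i d) = l := by
  by_cases h : i < l.length
  · simp [List.getD_eq_getElem?_getD, List.getElem?_eq_getElem h]
  · exact List.set_eq_of_length_le (by omega)

-- the master fold: each step sets index r from the current row r and the frozen row piv
theorem pvFoldSet_length (G : Nat → List Int → List Int → List Int) (piv : Nat) :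
    ∀ (l : List Nat) (m : List (List Int)),
      (l.foldl (fun acc r => acc.set r (G r (acc.getD r []) (acc.getD piv []))) m).length
        = m.length := by
  intro l
  induction l with
  | nil => intro m; rfl
  | cons r l ih =>
    intro m
    rw [List.foldl_cons, ih]
    exact List.length_set

theorem pvFoldSet_getD (G : Nat → List Int → List Int → List Int) (piv : Nat) :
    ∀ (l : List Nat) (m : List (List Int)), l.Pairwise (· < ·) → piv ∉ l →
      (∀ r ∈ l, r < m.length) → ∀ s,
      (l.foldl (fun acc r => acc.set r (G r (acc.getD r []) (acc.getD piv []))) m).getD s []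
        = if s ∈ l then G s (m.getD s []) (m.getD piv []) else m.getD s [] := by
  intro l
  induction l with
  | nil => intro m _ _ _ s; simp
  | cons r l ih =>
    intro m hpw hpiv hlen s
    have hr : r < m.length := hlen r (by simp)
    have hpr : piv ≠ r := fun h => hpiv (by simp [h])
    have hlt : ∀ x ∈ l, r < x := fun x hx => (List.pairwise_cons.mp hpw).1 x hx
    set m' := m.set r (G r (m.getD r []) (m.getD piv [])) with hm'
    have hlen' : ∀ x ∈ l, x < m'.length := by
      intro x hx
      have := hlen x (List.mem_cons_of_mem _ hx)
      simpa [hm'] using this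
    have hmain := ih m' (List.pairwise_cons.mp hpw).2 (fun h => hpiv (List.mem_cons_of_mem _ h)) hlen' s
    have hgpiv : m'.getD piv [] = m.getD piv [] := pvGetD_set_ne _ _ _ _ _ (Ne.symm hpr)
    rw [List.foldl_cons, ← hm', hmain]
    by_cases hs : s ∈ l
    · have hrs : r ≠ s := fun h => absurd (hlt s hs) (by omega)
      have h1 : m'.getD s [] = m.getD s [] := pvGetD_set_ne _ _ _ _ _ hrs
      rw [if_pos hs, if_pos (List.mem_cons_of_mem _ hs), h1, hgpiv]
    · by_cases hsr : s = r
      · subst hsr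
        rw [if_neg hs, if_pos List.mem_cons_self]
        exact pvGetD_set_self _ _ _ _ hr
      · have hns : s ∉ (r :: l) := by simp [hsr, hs]
        rw [if_neg hs, if_neg hns]
        exact pvGetD_set_ne _ _ _ _ _ (fun h => hsr h.symm)

-- a guarded body that never fires equals the identity fold
theorem pvFoldl_guard_filter (f : List (List Int) → Nat → List (List Int)) (rank : Nat) :
    ∀ (l : List Nat) (m : List (List Int)),
      l.foldl (fun acc r => if r = rank then acc else f acc r) m
        = (l.filter (fun r => r ≠ rank)).foldl f m := by
  intro l
  induction l with
  | nil => intro m; rfl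
  | cons r l ih =>
    intro m
    by_cases h : r = rank <;> simp [List.foldl_cons, h, ih]

theorem pvFind?_congr {α : Type} (p q : α → Bool) :
    ∀ (l : List α), (∀ x ∈ l, p x = q x) → l.find? p = l.find? q := by
  intro l
  induction l with
  | nil => intro _; rfl
  | cons x l ih =>
    intro h
    have hx := h x (by simp)
    rw [List.find?_cons, List.find?_cons, hx]
    cases q x <;> simp [ih (fun y hy => h y (List.mem_cons_of_mem _ hy))]

-- ----- helper notions for the proof -----

-- one elimination of a row against pivot row `prow` at column `col` (both ports' comprehension)
def pvG (col ncols : Nat) (row prow : List Int) : List Int :=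
  if pvMod3 (row.getD col 0) ≠ 0 then pvElimRow row (pvMod3 (row.getD col 0)) prow ncols else row

-- the loop invariant tying A's in-place matrix to B's forward matrix
def pvInv (nrows ncols : Nat) (mA mB : List (List Int)) (rank : Nat) (pivots : List Nat) : Prop :=
  mA.length = nrows ∧ mB.length = nrows ∧ pivots.length = rank ∧ rank ≤ nrows ∧
  (∀ r, rank ≤ r → mA.getD r [] = mB.getD r []) ∧
  (∀ i, i < rank → mA.getD i [] = pvSweepRow mB pivots rank ncols i (mB.getD i []))

theorem pvSwap_length (m : List (List Int)) (i j : Nat) : (pvSwap m i j).length = m.length := by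
  simp [pvSwap]

theorem pvSwap_getD (m : List (List Int)) (i j s : Nat) (hi : i < m.length) (hj : j < m.length) :
    (pvSwap m i j).getD s []
      = if s = j then m.getD i [] else if s = i then m.getD j [] else m.getD s [] := by
  unfold pvSwap
  by_cases hsj : s = j
  · subst hsj; rw [if_pos rfl]
    exact pvGetD_set_self _ _ _ _ (by simpa using hj)
  · rw [if_neg hsj, pvGetD_set_ne _ _ _ _ _ (fun h => hsj h.symm)]
    by_cases hsi : s = i
    · subst hsi; rw [if_pos rfl]; exact pvGetD_set_self _ _ _ _ hi
    · rw [if_neg hsi, pvGetD_set_ne _ _ _ _ _ (fun h => hsi h.symm)]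

-- the two elimination folds, rewritten to the master shape
theorem pvElimBody_eq (col rank ncols : Nat) :
    (fun (acc : List (List Int)) (r : Nat) =>
      if pvMod3 (pvEntry acc r col) ≠ 0 then
        acc.set r (pvElimRow (acc.getD r []) (pvMod3 (pvEntry acc r col)) (acc.getD rank []) ncols)
      else acc)
    = (fun acc r => acc.set r (pvG col ncols (acc.getD r []) (acc.getD rank []))) := by
  funext acc r
  unfold pvG pvEntry
  by_cases h : pvMod3 ((acc.getD r []).getD col 0) ≠ 0
  · rw [if_pos h, if_pos h]
  · rw [if_neg h, if_neg h, pvSet_getD_self]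

theorem pvElimA_getD (m2 : List (List Int)) (nrows ncols rank col : Nat)
    (hlen : m2.length = nrows) (s : Nat) :
    ((List.range nrows).foldl (fun acc r =>
        if r = rank then acc
        else if pvMod3 (pvEntry acc r col) ≠ 0 then
          acc.set r (pvElimRow (acc.getD r []) (pvMod3 (pvEntry acc r col)) (acc.getD rank []) ncols)
        else acc) m2).getD s []
    = if s < nrows ∧ s ≠ rank then pvG col ncols (m2.getD s []) (m2.getD rank [])
      else m2.getD s [] := by
  rw [pvFoldl_guard_filter, pvElimBody_eq]
  have hpw : ((List.range nrows).filter (fun r => r ≠ rank)).Pairwise (· < ·) :=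
    List.Pairwise.sublist List.filter_sublist List.pairwise_lt_range
  have hnm : rank ∉ (List.range nrows).filter (fun r => r ≠ rank) := by simp
  have hb : ∀ r ∈ (List.range nrows).filter (fun r => r ≠ rank), r < m2.length := by
    intro r hr; rw [hlen]; exact List.mem_range.mp (List.mem_of_mem_filter hr)
  have hmaster := pvFoldSet_getD (fun _ row prow => pvG col ncols row prow) rank _ m2 hpw hnm hb s
  beta_reduce at hmaster
  rw [hmaster]
  by_cases hs : s < nrows ∧ s ≠ rank
  · rw [if_pos (by simp [List.mem_filter, List.mem_range, hs.1, hs.2]), if_pos hs]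
  · rw [if_neg (by simp only [List.mem_filter, List.mem_range, decide_eq_true_eq]; tauto), if_neg hs]

theorem pvElimA_length (m2 : List (List Int)) (nrows ncols rank col : Nat) :
    ((List.range nrows).foldl (fun acc r =>
        if r = rank then acc
        else if pvMod3 (pvEntry acc r col) ≠ 0 then
          acc.set r (pvElimRow (acc.getD r []) (pvMod3 (pvEntry acc r col)) (acc.getD rank []) ncols)
        else acc) m2).length = m2.length := by
  rw [pvFoldl_guard_filter, pvElimBody_eq]
  have hmaster := pvFoldSet_length (fun _ row prow => pvG col ncols row prow) rank
    ((List.range nrows).filter (fun r => r ≠ rank)) m2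
  beta_reduce at hmaster
  rw [hmaster]

theorem pvRange'_pairwise (a n : Nat) : (List.range' a n).Pairwise (· < ·) := by
  rw [List.range'_eq_map_range]
  exact (List.pairwise_map).mpr (List.pairwise_lt_range.imp (by omega))

theorem pvElimB_getD (m2 : List (List Int)) (nrows ncols rank col : Nat)
    (hlen : m2.length = nrows) (hrk : rank < nrows) (s : Nat) :
    ((List.range' (rank + 1) (nrows - (rank + 1))).foldl (fun acc r =>
        if pvMod3 (pvEntry acc r col) ≠ 0 then
          acc.set r (pvElimRow (acc.getD r []) (pvMod3 (pvEntry acc r col)) (acc.getD rank []) ncols)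
        else acc) m2).getD s []
    = if rank + 1 ≤ s ∧ s < nrows then pvG col ncols (m2.getD s []) (m2.getD rank [])
      else m2.getD s [] := by
  rw [pvElimBody_eq]
  have hnm : rank ∉ List.range' (rank + 1) (nrows - (rank + 1)) := by
    intro h; have := List.mem_range'_1.mp h; omega
  have hb : ∀ r ∈ List.range' (rank + 1) (nrows - (rank + 1)), r < m2.length := by
    intro r hr; have := List.mem_range'_1.mp hr; omega
  have hmaster := pvFoldSet_getD (fun _ row prow => pvG col ncols row prow) rank _ m2
      (pvRange'_pairwise _ _) hnm hb s
  beta_reduce at hmaster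
  rw [hmaster]
  by_cases hs : rank + 1 ≤ s ∧ s < nrows
  · rw [if_pos (List.mem_range'_1.mpr (by omega)), if_pos hs]
  · rw [if_neg (fun h => hs (by have := List.mem_range'_1.mp h; omega)), if_neg hs]

theorem pvElimB_length (m2 : List (List Int)) (nrows ncols rank col : Nat) :
    ((List.range' (rank + 1) (nrows - (rank + 1))).foldl (fun acc r =>
        if pvMod3 (pvEntry acc r col) ≠ 0 then
          acc.set r (pvElimRow (acc.getD r []) (pvMod3 (pvEntry acc r col)) (acc.getD rank []) ncols)
        else acc) m2).length = m2.length := by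
  rw [pvElimBody_eq]
  have hmaster := pvFoldSet_length (fun _ row prow => pvG col ncols row prow) rank
    (List.range' (rank + 1) (nrows - (rank + 1))) m2
  beta_reduce at hmaster
  rw [hmaster]

-- phase 2 of B, characterized row by row
theorem pvPhase2_getD (m : List (List Int)) (pivots : List Nat) (rank ncols : Nat)
    (hrank : rank ≤ m.length) (s : Nat) :
    ((List.range rank).foldl (fun out i =>
        out.set i (pvSweepRow m pivots rank ncols i (out.getD i []))) m).getD s []
    = if s < rank then pvSweepRow m pivots rank ncols s (m.getD s []) else m.getD s [] := by
  have hbody : (fun (out : List (List Int)) (i : Nat) =>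
      out.set i (pvSweepRow m pivots rank ncols i (out.getD i [])))
    = (fun acc r => acc.set r ((fun i row (_ : List Int) => pvSweepRow m pivots rank ncols i row)
        r (acc.getD r []) (acc.getD rank []))) := rfl
  rw [hbody]
  have hmaster := pvFoldSet_getD (fun i row (_ : List Int) => pvSweepRow m pivots rank ncols i row)
      rank (List.range rank) m List.pairwise_lt_range (by simp)
      (fun r hr => lt_of_lt_of_le (List.mem_range.mp hr) hrank) s
  rw [hmaster]
  by_cases hs : s < rank
  · rw [if_pos (List.mem_range.mpr hs), if_pos hs]
  · rw [if_neg (fun h => hs (List.mem_range.mp h)), if_neg hs]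

theorem pvPhase2_length (m : List (List Int)) (pivots : List Nat) (rank ncols : Nat) :
    ((List.range rank).foldl (fun out i =>
        out.set i (pvSweepRow m pivots rank ncols i (out.getD i []))) m).length = m.length := by
  have hbody : (fun (out : List (List Int)) (i : Nat) =>
      out.set i (pvSweepRow m pivots rank ncols i (out.getD i [])))
    = (fun acc r => acc.set r ((fun i row (_ : List Int) => pvSweepRow m pivots rank ncols i row)
        r (acc.getD r []) (acc.getD rank []))) := rfl
  rw [hbody]
  exact pvFoldSet_length (fun i row (_ : List Int) => pvSweepRow m pivots rank ncols i row)
    rank (List.range rank) m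

-- pivot search only looks at rows at or below rank
theorem pvFindPivot_congr (mA mB : List (List Int)) (rank nrows col : Nat)
    (h : ∀ r, rank ≤ r → mA.getD r [] = mB.getD r []) :
    pvFindPivot mA rank nrows col = pvFindPivot mB rank nrows col := by
  unfold pvFindPivot
  refine pvFind?_congr _ _ _ (fun r hr => ?_)
  have hle : rank ≤ r := (List.mem_range'_1.mp hr).1
  unfold pvEntry
  rw [h r hle]

theorem pvFindPivot_bounds {m : List (List Int)} {rank nrows col p : Nat}
    (h : pvFindPivot m rank nrows col = some p) : rank ≤ p ∧ p < nrows := by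
  have := List.mem_range'_1.mp (List.mem_of_find?_eq_some h)
  omega

-- B's loop does nothing once rank has reached n_rows
theorem pvStepB_stuck (nrows ncols : Nat) :
    ∀ (l : List Nat) (s : List (List Int) × Nat × List Nat), nrows ≤ s.2.1 →
      l.foldl (pvStepB nrows ncols) s = s := by
  intro l
  induction l with
  | nil => intro s _; rfl
  | cons c l ih =>
    intro s h
    rw [List.foldl_cons, show pvStepB nrows ncols s c = s by simp [pvStepB, h]]
    exact ih s h

-- the sweep of a row, extended by one more recorded pivot
theorem pvSweep_extend (mB3 mB : List (List Int)) (pivots : List Nat) (col rank ncols i : Nat)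
    (hi : i < rank) (hplen : pivots.length = rank)
    (hrows : ∀ k, k < rank → mB3.getD k [] = mB.getD k []) (row : List Int) :
    pvSweepRow mB3 (pivots ++ [col]) (rank + 1) ncols i row
      = pvG col ncols (pvSweepRow mB pivots rank ncols i row) (mB3.getD rank []) := by
  unfold pvSweepRow
  have h1 : rank + 1 - (i + 1) = (rank - (i + 1)) + 1 := by omega
  have h2 : List.range' (i + 1) ((rank - (i + 1)) + 1)
      = List.range' (i + 1) (rank - (i + 1)) ++ [(i + 1) + (rank - (i + 1))] := by
    simpa using List.range'_1_concat (s := i + 1) (n := rank - (i + 1))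
  have h3 : (i + 1) + (rank - (i + 1)) = rank := by omega
  rw [h1, h2, h3, List.foldl_append]
  have hcongr : (List.range' (i + 1) (rank - (i + 1))).foldl (fun row k =>
        if pvMod3 (row.getD ((pivots ++ [col]).getD k 0) 0) ≠ 0 then
          pvElimRow row (pvMod3 (row.getD ((pivots ++ [col]).getD k 0) 0)) (mB3.getD k []) ncols
        else row) row
      = (List.range' (i + 1) (rank - (i + 1))).foldl (fun row k =>
        if pvMod3 (row.getD (pivots.getD k 0) 0) ≠ 0 then
          pvElimRow row (pvMod3 (row.getD (pivots.getD k 0) 0)) (mB.getD k []) ncols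
        else row) row := by
    refine PySem.List.foldl_congr_mem _ _ _ _ (fun acc k hk => ?_)
    have hkr : k < rank := by have := List.mem_range'_1.mp hk; omega
    rw [List.getD_append _ _ _ _ (by omega), hrows k hkr]
  rw [hcongr]
  have hlast : (pivots ++ [col]).getD rank 0 = col := by
    rw [List.getD_append_right _ _ _ _ (by omega), hplen]
    simp
  rw [List.foldl_cons, List.foldl_nil, hlast]
  unfold pvG
  rfl

theorem pvSweep_self (mB : List (List Int)) (pivots : List Nat) (rank ncols : Nat)
    (row : List Int) : pvSweepRow mB pivots (rank + 1) ncols rank row = row := by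
  unfold pvSweepRow
  simp

theorem pvList_ext (l1 l2 : List (List Int)) (hlen : l1.length = l2.length)
    (h : ∀ i, l1.getD i [] = l2.getD i []) : l1 = l2 := by
  apply List.ext_getElem?
  intro i
  by_cases hi : i < l1.length
  · have h1 : l1[i]? = some (l1.getD i []) := by
      rw [List.getElem?_eq_getElem hi, List.getD_eq_getElem _ _ hi]
    have h2 : l2[i]? = some (l2.getD i []) := by
      rw [List.getElem?_eq_getElem (by omega), List.getD_eq_getElem _ _ (by omega)]
    rw [h1, h2, h i]
  · rw [List.getElem?_eq_none (by omega), List.getElem?_eq_none (by omega)]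

-- one synchronized step with a pivot: A's full elimination vs B's below-only elimination
theorem pvStep_some (nrows ncols : Nat) (mA mB : List (List Int)) (rank col p : Nat)
    (pivots : List Nat)
    (hlA : mA.length = nrows) (hlB : mB.length = nrows) (hplen : pivots.length = rank)
    (hrle : rank ≤ nrows)
    (hge : ∀ r, rank ≤ r → mA.getD r [] = mB.getD r [])
    (hlt : ∀ i, i < rank → mA.getD i [] = pvSweepRow mB pivots rank ncols i (mB.getD i []))
    (hrk : rank < nrows) (hp1 : rank ≤ p) (hp2 : p < nrows) :
    pvInv nrows ncols
      ((List.range nrows).foldl (fun acc r =>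
          if r = rank then acc
          else if pvMod3 (pvEntry acc r col) ≠ 0 then
            acc.set r (pvElimRow (acc.getD r []) (pvMod3 (pvEntry acc r col)) (acc.getD rank []) ncols)
          else acc)
        ((pvSwap mA rank p).set rank
          (pvNorm (if pvEntry (pvSwap mA rank p) rank col = 1 then 1 else 2)
            ((pvSwap mA rank p).getD rank []))))
      ((List.range' (rank + 1) (nrows - (rank + 1))).foldl (fun acc r =>
          if pvMod3 (pvEntry acc r col) ≠ 0 then
            acc.set r (pvElimRow (acc.getD r []) (pvMod3 (pvEntry acc r col)) (acc.getD rank []) ncols)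
          else acc)
        ((pvSwap mB rank p).set rank
          (pvNorm (if pvEntry (pvSwap mB rank p) rank col = 1 then 1 else 2)
            ((pvSwap mB rank p).getD rank []))))
      (rank + 1) (pivots ++ [col]) := by
  have hrkA : rank < mA.length := by omega
  have hrkB : rank < mB.length := by omega
  have hpA : p < mA.length := by omega
  have hpB : p < mB.length := by omega
  -- the swapped matrices agree at every index ≥ rank, and are untouched below rank
  have hswapA : ∀ s, (pvSwap mA rank p).getD s []
      = if s = p then mA.getD rank [] else if s = rank then mA.getD p [] else mA.getD s [] :=
    fun s => pvSwap_getD mA rank p s hrkA hpA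
  have hswapB : ∀ s, (pvSwap mB rank p).getD s []
      = if s = p then mB.getD rank [] else if s = rank then mB.getD p [] else mB.getD s [] :=
    fun s => pvSwap_getD mB rank p s hrkB hpB
  have hsrankEq : (pvSwap mA rank p).getD rank [] = (pvSwap mB rank p).getD rank [] := by
    rw [hswapA, hswapB]
    by_cases h : rank = p
    · rw [if_pos h, if_pos h]; exact hge rank (le_refl _)
    · rw [if_neg h, if_pos rfl, if_neg h, if_pos rfl]; exact hge p hp1
  have hinvEq : (if pvEntry (pvSwap mA rank p) rank col = 1 then (1:Int) else 2)
      = (if pvEntry (pvSwap mB rank p) rank col = 1 then (1:Int) else 2) := by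
    unfold pvEntry; rw [hsrankEq]
  -- the normalized matrices
  set invB : Int := if pvEntry (pvSwap mB rank p) rank col = 1 then 1 else 2 with hinvB
  set N : List Int := pvNorm invB ((pvSwap mB rank p).getD rank []) with hN
  set m2A := (pvSwap mA rank p).set rank
      (pvNorm (if pvEntry (pvSwap mA rank p) rank col = 1 then 1 else 2)
        ((pvSwap mA rank p).getD rank [])) with hm2A
  set m2B := (pvSwap mB rank p).set rank N with hm2B
  have hl2A : m2A.length = nrows := by rw [hm2A, List.length_set, pvSwap_length, hlA]
  have hl2B : m2B.length = nrows := by rw [hm2B, List.length_set, pvSwap_length, hlB]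
  have hm2A_rank : m2A.getD rank [] = N := by
    rw [hm2A, pvGetD_set_self _ _ _ _ (by rw [pvSwap_length]; omega), hinvEq, hsrankEq]
  have hm2B_rank : m2B.getD rank [] = N :=
    pvGetD_set_self _ _ _ _ (by rw [pvSwap_length]; omega)
  have hm2A_ne : ∀ s, s ≠ rank → m2A.getD s []
      = (if s = p then mA.getD rank [] else mA.getD s []) := by
    intro s hs
    rw [hm2A, pvGetD_set_ne _ _ _ _ _ (fun h => hs h.symm), hswapA]
    by_cases h : s = p
    · rw [if_pos h, if_pos h]
    · rw [if_neg h, if_neg hs, if_neg h]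
  have hm2B_ne : ∀ s, s ≠ rank → m2B.getD s []
      = (if s = p then mB.getD rank [] else mB.getD s []) := by
    intro s hs
    rw [hm2B, pvGetD_set_ne _ _ _ _ _ (fun h => hs h.symm), hswapB]
    by_cases h : s = p
    · rw [if_pos h, if_pos h]
    · rw [if_neg h, if_neg hs, if_neg h]
  -- rows at or above rank agree between the two normalized matrices
  have hm2eq : ∀ s, rank ≤ s → m2A.getD s [] = m2B.getD s [] := by
    intro s hs
    by_cases hsr : s = rank
    · rw [hsr, hm2A_rank, hm2B_rank]
    · rw [hm2A_ne s hsr, hm2B_ne s hsr]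
      by_cases h : s = p
      · rw [if_pos h, if_pos h]; exact hge rank (le_refl _)
      · rw [if_neg h, if_neg h]; exact hge s hs
  -- rows strictly below rank are untouched by swap and normalization
  have hm2A_lt : ∀ i, i < rank → m2A.getD i [] = mA.getD i [] := by
    intro i hi
    rw [hm2A_ne i (by omega), if_neg (by omega)]
  have hm2B_lt : ∀ i, i < rank → m2B.getD i [] = mB.getD i [] := by
    intro i hi
    rw [hm2B_ne i (by omega), if_neg (by omega)]
  -- characterize both elimination folds
  have hA3 := fun s => pvElimA_getD m2A nrows ncols rank col hl2A s
  have hB3 := fun s => pvElimB_getD m2B nrows ncols rank col hl2B hrk s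
  set m3A := (List.range nrows).foldl (fun acc r =>
      if r = rank then acc
      else if pvMod3 (pvEntry acc r col) ≠ 0 then
        acc.set r (pvElimRow (acc.getD r []) (pvMod3 (pvEntry acc r col)) (acc.getD rank []) ncols)
      else acc) m2A with hm3A
  set m3B := (List.range' (rank + 1) (nrows - (rank + 1))).foldl (fun acc r =>
      if pvMod3 (pvEntry acc r col) ≠ 0 then
        acc.set r (pvElimRow (acc.getD r []) (pvMod3 (pvEntry acc r col)) (acc.getD rank []) ncols)
      else acc) m2B with hm3B
  have hl3A : m3A.length = nrows := by rw [hm3A, pvElimA_length, hl2A]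
  have hl3B : m3B.length = nrows := by rw [hm3B, pvElimB_length, hl2B]
  have hm3B_rank : m3B.getD rank [] = N := by
    rw [hB3 rank, if_neg (by omega), hm2B_rank]
  have hm3B_lt : ∀ k, k < rank → m3B.getD k [] = mB.getD k [] := by
    intro k hk
    rw [hB3 k, if_neg (by omega), hm2B_lt k hk]
  refine ⟨hl3A, hl3B, by simp [hplen], by omega, ?_, ?_⟩
  · -- rows at or below the new rank agree
    intro r hr
    by_cases hrn : r < nrows
    · rw [hA3 r, if_pos ⟨hrn, by omega⟩, hB3 r, if_pos ⟨by omega, hrn⟩,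
        hm2eq r (by omega), hm2A_rank, hm2B_rank]
    · rw [hA3 r, if_neg (by omega), hB3 r, if_neg (by omega)]
      exact hm2eq r (by omega)
  · -- rows above the new rank carry the deferred sweeps
    intro i hi
    by_cases hir : i = rank
    · subst hir
      rw [hA3 i, if_neg (by simp), hm2A_rank, pvSweep_self, hm3B_rank]
    · have hilt : i < rank := by omega
      rw [hA3 i, if_pos ⟨by omega, by omega⟩, hm2A_lt i hilt, hm2A_rank,
        hm3B_lt i hilt,
        pvSweep_extend m3B mB pivots col rank ncols i hilt hplen hm3B_lt,
        hm3B_rank, ← hlt i hilt]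

-- the synchronized loops: A's Gauss-Jordan loop against B's forward-phase fold
theorem pvMain (nrows ncols : Nat) :
    ∀ (n col : Nat), ncols = col + n →
    ∀ (mA mB : List (List Int)) (rank : Nat) (pivots : List Nat),
      pvInv nrows ncols mA mB rank pivots →
      (pvLoopA nrows ncols mA rank col pivots).1
          = ((List.range' col n).foldl (pvStepB nrows ncols) (mB, rank, pivots)).2.1
      ∧ (pvLoopA nrows ncols mA rank col pivots).2.2
          = ((List.range' col n).foldl (pvStepB nrows ncols) (mB, rank, pivots)).2.2
      ∧ pvInv nrows ncols (pvLoopA nrows ncols mA rank col pivots).2.1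
          ((List.range' col n).foldl (pvStepB nrows ncols) (mB, rank, pivots)).1
          ((List.range' col n).foldl (pvStepB nrows ncols) (mB, rank, pivots)).2.1
          ((List.range' col n).foldl (pvStepB nrows ncols) (mB, rank, pivots)).2.2 := by
  intro n
  induction n with
  | zero =>
    intro col hc mA mB rank pivots hInv
    rw [pvLoopA, dif_neg (by omega)]
    exact ⟨rfl, rfl, hInv⟩
  | succ n ih =>
    intro col hc mA mB rank pivots hInv
    have hcol : col < ncols := by omega
    obtain ⟨hlA, hlB, hplen, hrle, hge, hlt⟩ := hInv
    rw [List.range'_succ, List.foldl_cons]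
    by_cases hrk : rank < nrows
    · have hfind : pvFindPivot mA rank nrows col = pvFindPivot mB rank nrows col :=
        pvFindPivot_congr _ _ _ _ _ hge
      cases hP : pvFindPivot mB rank nrows col with
      | none =>
        rw [pvLoopA, dif_pos ⟨hrk, hcol⟩, hfind, hP]
        have hstep : pvStepB nrows ncols (mB, rank, pivots) col = (mB, rank, pivots) := by
          simp [pvStepB, hP, Nat.not_le.mpr hrk]
        rw [hstep]
        exact ih (col + 1) (by omega) mA mB rank pivots ⟨hlA, hlB, hplen, hrle, hge, hlt⟩
      | some p =>
        obtain ⟨hp1, hp2⟩ := pvFindPivot_bounds hP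
        rw [pvLoopA, dif_pos ⟨hrk, hcol⟩, hfind, hP]
        have hstep : pvStepB nrows ncols (mB, rank, pivots) col
            = ((List.range' (rank + 1) (nrows - (rank + 1))).foldl (fun acc r =>
                if pvMod3 (pvEntry acc r col) ≠ 0 then
                  acc.set r (pvElimRow (acc.getD r []) (pvMod3 (pvEntry acc r col))
                    (acc.getD rank []) ncols)
                else acc)
              ((pvSwap mB rank p).set rank
                (pvNorm (if pvEntry (pvSwap mB rank p) rank col = 1 then 1 else 2)
                  ((pvSwap mB rank p).getD rank []))),
              rank + 1, pivots ++ [col]) := by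
          simp [pvStepB, hP, Nat.not_le.mpr hrk]
        rw [hstep]
        exact ih (col + 1) (by omega) _ _ (rank + 1) (pivots ++ [col])
          (pvStep_some nrows ncols mA mB rank col p pivots hlA hlB hplen hrle hge hlt hrk hp1 hp2)
    · rw [pvLoopA, dif_neg (fun h => hrk h.1)]
      have hstep : pvStepB nrows ncols (mB, rank, pivots) col = (mB, rank, pivots) := by
        simp [pvStepB, Nat.le_of_not_lt hrk]
      rw [hstep, pvStepB_stuck nrows ncols _ _ (Nat.le_of_not_lt hrk)]
      exact ⟨rfl, rfl, ⟨hlA, hlB, hplen, hrle, hge, hlt⟩⟩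


theorem row_reduce_mod3_main : ∀ mat, row_reduce_mod3 mat = row_reduce_mod3_alt mat := by
  intro mat
  unfold row_reduce_mod3 row_reduce_mod3_alt
  dsimp only
  have h0 : pvInv mat.length (if mat.length ≠ 0 then (mat.headD []).length else 0) mat mat 0 [] :=
    ⟨rfl, rfl, rfl, Nat.zero_le _, fun _ _ => rfl, fun i hi => absurd hi (Nat.not_lt_zero i)⟩
  have hmain := pvMain mat.length (if mat.length ≠ 0 then (mat.headD []).length else 0)
      (if mat.length ≠ 0 then (mat.headD []).length else 0) 0 (by omega) mat mat 0 [] h0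
  rw [← List.range_eq_range'] at hmain
  obtain ⟨h1, h2, hlA, hlB, hplen, hrle, hge, hlt⟩ := hmain
  simp only [Prod.mk.injEq]
  refine ⟨by rw [h1], ?_, by rw [h2]⟩
  refine pvList_ext _ _ ?_ ?_
  · rw [hlA, pvPhase2_length, hlB]
  · intro i
    rw [pvPhase2_getD _ _ _ _ (by rw [hlB]; exact hrle) i]
    by_cases hi : i < ((List.range (if mat.length ≠ 0 then (mat.headD []).length else 0)).foldl
        (pvStepB mat.length (if mat.length ≠ 0 then (mat.headD []).length else 0)) (mat, 0, [])).2.1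
    · rw [if_pos hi]
      exact hlt i hi
    · rw [if_neg hi]
      exact hge i (Nat.le_of_not_lt hi)

-- ===== VERDICT (by name: the statement is the Claim_ definition above) =====
theorem row_reduce_mod3_spec : Claim_equal_row_reduce_mod3 := by
  intro mat _ _
  unfold Spec_row_reduce_mod3
  exact row_reduce_mod3_main mat
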